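-- pv_equiv track=rewrite | github.com/JackySun9/omnimodal | backend/app/services/download_manager.py | _filter_files_by_modality
-- ===== SOURCE A (Python) =====
-- def _filter_files_by_modality(files: list[str], modality: str) -> list[str]:
--     """Filter repository files based on model modality."""
--     filtered = []
--
--     if modality == "text":
--         # For LLMs, prioritize GGUF files or safetensors
--         for pattern in [".gguf", ".safetensors", ".bin", "config.json", "tokenizer"]:
--             filtered.extend([f for f in files if pattern in f.lower()])
--
--     elif modality == "image":
--         # For image models, get safetensors and config files
--         for pattern in [".safetensors", ".ckpt", ".bin", "config.json", "model_index.json"]: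
--             filtered.extend([f for f in files if pattern in f.lower()])
--
--     elif modality == "stt":
--         # For STT models (Whisper), get .bin or .pt files
--         for pattern in [".bin", ".pt", "config.json"]:
--             filtered.extend([f for f in files if pattern in f.lower()])
--
--     elif modality == "tts":
--         # For TTS models, get model files and configs
--         for pattern in [".pth", ".pt", ".onnx", "config.json"]:
--             filtered.extend([f for f in files if pattern in f.lower()])
--
--     elif modality == "video":
--         # For video models, get safetensors and configs
--         for pattern in [".safetensors", ".ckpt", "config.json"]:
--             filtered.extend([f for f in files if pattern in f.lower()])
--
--     # Remove duplicates while preserving order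
--     seen = set()
--     result = []
--     for f in filtered:
--         if f not in seen:
--             seen.add(f)
--             result.append(f)
--
--     return result
-- ===== SOURCE B (Python) =====
-- def _filter_files_by_modality(files: list[str], modality: str) -> list[str]:
--     """Single pass over files: each new file goes into the bucket of the first
--     pattern it matches; buckets are concatenated in pattern order."""
--     patterns = {
--         "text": [".gguf", ".safetensors", ".bin", "config.json", "tokenizer"],
--         "image": [".safetensors", ".ckpt", ".bin", "config.json", "model_index.json"],
--         "stt": [".bin", ".pt", "config.json"],
--         "tts": [".pth", ".pt", ".onnx", "config.json"],
--         "video": [".safetensors", ".ckpt", "config.json"],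
--     }.get(modality, [])
--     buckets = [[] for _ in patterns]
--     seen = set()
--     for f in files:
--         if f in seen:
--             continue
--         seen.add(f)
--         low = f.lower()
--         for i, p in enumerate(patterns):
--             if p in low:
--                 buckets[i].append(f)
--                 break
--     return [f for b in buckets for f in b]
-- ===== Notes on version B (the rewrite author's own statement) =====
-- stated objective: alternative
-- what changed: Instead of one pass per pattern building a concatenated list and then deduplicating it, B makes a single pass over the files, putting each not-yet-seen file into the bucket of the first pattern it matches (break on first hit) and concatenating the buckets, so the extend-then-dedup phase disappears.
import Mathlib
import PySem

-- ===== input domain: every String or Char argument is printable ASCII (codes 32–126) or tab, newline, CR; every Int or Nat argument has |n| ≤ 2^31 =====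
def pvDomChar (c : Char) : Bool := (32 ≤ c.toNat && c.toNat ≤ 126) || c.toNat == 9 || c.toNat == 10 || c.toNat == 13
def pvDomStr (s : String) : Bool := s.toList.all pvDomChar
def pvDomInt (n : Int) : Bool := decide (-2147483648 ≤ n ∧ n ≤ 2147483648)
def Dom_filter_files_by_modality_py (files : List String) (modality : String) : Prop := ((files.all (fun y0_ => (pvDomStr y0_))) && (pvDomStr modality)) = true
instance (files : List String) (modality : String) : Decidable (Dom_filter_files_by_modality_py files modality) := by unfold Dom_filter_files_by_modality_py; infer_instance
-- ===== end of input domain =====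

-- B restructures A's per-pattern extend-then-dedup loops into a single pass over
-- the files that drops each new file into the bucket of the first pattern it
-- matches and concatenates the buckets (objective: alternative decomposition).

-- ===== PORT A =====
-- 'pattern in f.lower()'
def pvMatch (p f : String) : Bool := PySem.Str.isIn p (PySem.Str.lower f)

-- 'for pattern in ps: filtered.extend([f for f in files if pattern in f.lower()])'
def pvExtendLoop (files ps : List String) : List String :=
  ps.foldl (fun acc p => acc ++ files.filter (fun f => pvMatch p f)) []

def filter_files_by_modality_py (files : List String) (modality : String) : List String :=
  let filtered :=
    if modality == "text" then
      pvExtendLoop files [".gguf", ".safetensors", ".bin", "config.json", "tokenizer"]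
    else if modality == "image" then
      pvExtendLoop files [".safetensors", ".ckpt", ".bin", "config.json", "model_index.json"]
    else if modality == "stt" then
      pvExtendLoop files [".bin", ".pt", "config.json"]
    else if modality == "tts" then
      pvExtendLoop files [".pth", ".pt", ".onnx", "config.json"]
    else if modality == "video" then
      pvExtendLoop files [".safetensors", ".ckpt", "config.json"]
    else []
  -- 'seen = set(); result = []; for f in filtered: if f not in seen: seen.add(f); result.append(f)'
  let fin := filtered.foldl
    (fun (st : PySem.Set String × List String) f =>
      if PySem.Set.contains st.1 f then st else (PySem.Set.add st.1 f, st.2 ++ [f]))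
    (PySem.Set.empty, [])
  fin.2

-- ===== PORT B =====
-- inner 'for i, p in enumerate(patterns): if p in low: …; break' — index of first match
def pvFirstIdx (ps : List String) (low : String) : Option Nat :=
  match ps with
  | [] => none
  | p :: rest => if PySem.Str.isIn p low then some 0 else (pvFirstIdx rest low).map (· + 1)

def filter_files_by_modality_py_alt (files : List String) (modality : String) : List String :=
  let patterns := PySem.Dict.getD
    (PySem.Dict.ofList
      [("text", [".gguf", ".safetensors", ".bin", "config.json", "tokenizer"]),
       ("image", [".safetensors", ".ckpt", ".bin", "config.json", "model_index.json"]),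
       ("stt", [".bin", ".pt", "config.json"]),
       ("tts", [".pth", ".pt", ".onnx", "config.json"]),
       ("video", [".safetensors", ".ckpt", "config.json"])])
    modality []
  let fin := files.foldl
    (fun (st : PySem.Set String × List (List String)) f =>
      if PySem.Set.contains st.1 f then st
      else
        let seen' := PySem.Set.add st.1 f
        match pvFirstIdx patterns (PySem.Str.lower f) with
        | none => (seen', st.2)
        | some i => (seen', st.2.modify i (· ++ [f])))
    (PySem.Set.empty, patterns.map (fun _ => []))
  fin.2.flatten

-- ===== PRECONDITION & SPEC =====
def Spec_filter_files_by_modality_py (files : List String) (modality : String) (out : List String) : Prop := out = filter_files_by_modality_py_alt files modality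
instance (files : List String) (modality : String) (out : List String) : Decidable (Spec_filter_files_by_modality_py files modality out) := by unfold Spec_filter_files_by_modality_py; infer_instance

-- ===== CLAIM (what is proved, stated in full; the proofs are below) =====
def Claim_equal_filter_files_by_modality_py : Prop := ∀ (files : List String) (modality : String), Dom_filter_files_by_modality_py files modality → Spec_filter_files_by_modality_py files modality (filter_files_by_modality_py files modality)

-- ===== LEMMAS AND PROOFS =====

theorem pvDiag (xs : List String) : ∀ (s : List String),
    (xs.foldl (fun (st : PySem.Set String × List String) f =>
        if PySem.Set.contains st.1 f then st else (PySem.Set.add st.1 f, st.2 ++ [f]))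
      (s, s)) = (xs.foldl PySem.Set.add s, xs.foldl PySem.Set.add s) := by
  induction xs with
  | nil => intro s; rfl
  | cons x xs ih =>
    intro s
    simp only [List.foldl_cons]
    by_cases h : PySem.Set.contains s x
    · rw [if_pos h]
      have : PySem.Set.add s x = s := by simp [PySem.Set.add, PySem.Set.contains_eq_listContains] at h ⊢; simp [h]
      rw [this, ih]
    · rw [if_neg h]
      have : PySem.Set.add s x = s ++ [x] := by simp [PySem.Set.add, PySem.Set.contains_eq_listContains] at h ⊢; simp [h]
      rw [← this, ih]

theorem pvDedupLoop (xs : List String) :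
    (xs.foldl (fun (st : PySem.Set String × List String) f =>
        if PySem.Set.contains st.1 f then st else (PySem.Set.add st.1 f, st.2 ++ [f]))
      (PySem.Set.empty, [])).2 = PySem.List.dedup xs := by
  have := pvDiag xs []
  simp [PySem.Set.empty] at this ⊢
  rw [this]
  simp [PySem.Set.ofList_eq_foldl]
theorem pvContainsOfList (xs : List String) (y : String) :
    (PySem.Set.ofList xs).contains y = xs.contains y := by
  rw [Bool.eq_iff_iff]
  simp [PySem.Set.mem_ofList]

theorem pvDedupAppend (xs ys : List String) :
    PySem.List.dedup (xs ++ ys)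
      = PySem.List.dedup xs ++ (PySem.List.dedup ys).filter (fun y => !xs.contains y) := by
  simp only [PySem.List.dedup_eq_ofList, PySem.Set.ofList_eq_foldl, List.foldl_append]
  rw [← PySem.Set.ofList_eq_foldl]
  rw [show List.foldl PySem.Set.add (PySem.Set.ofList xs) ys = PySem.Set.update (PySem.Set.ofList xs) ys from rfl,
    PySem.Set.update_eq_append_filter]
  rw [← PySem.Set.ofList_eq_foldl]
  congr 1
  exact List.filter_congr (fun y _ => by rw [pvContainsOfList])

theorem pvDedupCons (x : String) (ys : List String) :
    PySem.List.dedup (x :: ys) = x :: (PySem.List.dedup ys).filter (fun y => !(y == x)) := by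
  have h := pvDedupAppend [x] ys
  rw [List.singleton_append] at h
  rw [h, show PySem.List.dedup [x] = [x] from rfl, List.singleton_append]
  congr 1
  exact List.filter_congr (fun y _ => by rw [Bool.eq_iff_iff]; simp)

theorem pvDedupFilter (q : String → Bool) (xs : List String) :
    PySem.List.dedup (xs.filter q) = (PySem.List.dedup xs).filter q := by
  induction xs with
  | nil => rfl
  | cons x xs ih =>
    by_cases h : q x
    · rw [List.filter_cons_of_pos h, pvDedupCons, pvDedupCons, ih,
        List.filter_cons_of_pos h, List.filter_filter, List.filter_filter]
      congr 1
      exact List.filter_congr (fun y _ => by rw [Bool.and_comm])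
    · rw [List.filter_cons_of_neg h, ih, pvDedupCons, List.filter_cons_of_neg h, List.filter_filter]
      exact (List.filter_congr (fun y _ => by
        by_cases hy : y = x
        · subst hy; simp [h]
        · simp [hy])).symm

def pvGroup : List String → List String → List String
  | [], _ => []
  | p :: ps, l => l.filter (fun f => pvMatch p f) ++ pvGroup ps (l.filter (fun f => !pvMatch p f))

theorem pvKeyA (ps : List String) : ∀ (fs : List String),
    PySem.List.dedup (ps.flatMap (fun p => fs.filter (fun f => pvMatch p f)))
      = pvGroup ps (PySem.List.dedup fs) := by
  induction ps with
  | nil => intro fs; rfl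
  | cons p ps ih =>
    intro fs
    rw [List.flatMap_cons, pvDedupAppend, pvDedupFilter, pvGroup]
    congr 1
    have hmem : ∀ y ∈ PySem.List.dedup (ps.flatMap (fun p' => fs.filter (fun f => pvMatch p' f))), y ∈ fs := by
      intro y hy
      rw [PySem.List.mem_dedup] at hy
      obtain ⟨p', _, hy2⟩ := List.mem_flatMap.mp hy
      exact (List.mem_filter.mp hy2).1
    rw [List.filter_congr (l := PySem.List.dedup (ps.flatMap (fun p' => fs.filter (fun f => pvMatch p' f))))
      (q := fun y => !pvMatch p y) (fun y hy => by
        have hyf := hmem y hy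
        rw [Bool.eq_iff_iff]
        simp only [Bool.not_eq_true']
        rw [← Bool.not_eq_true, ← Bool.not_eq_true]
        constructor
        · intro hc hm
          exact hc (by simp [List.mem_filter, hyf, hm])
        · intro hm hc
          exact hm (List.mem_filter.mp (List.contains_iff_mem.mp hc)).2)]
    rw [← pvDedupFilter, List.filter_flatMap]
    have h2 := ih (List.filter (fun f => !pvMatch p f) fs)
    rw [pvDedupFilter] at h2
    rw [← h2]
    refine congrArg PySem.List.dedup (congrFun (congrArg List.flatMap (funext fun p' => ?_)) ps)
    simp only [List.filter_filter]
    exact List.filter_congr (fun y _ => Bool.and_comm _ _)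

def pvAddAll (ps : List String) (bks : List (List String)) (l : List String) : List (List String) :=
  l.foldl (fun b f =>
    match pvFirstIdx ps (PySem.Str.lower f) with
    | none => b
    | some i => b.modify i (· ++ [f])) bks

theorem pvContainsAdd (s : PySem.Set String) (f y : String) :
    (PySem.Set.add s f).contains y = (s.contains y || y == f) := by
  rw [Bool.eq_iff_iff]
  simp [PySem.Set.mem_add]

theorem pvFilterAdd (s : PySem.Set String) (f : String) (l : List String) :
    l.filter (fun y => !(PySem.Set.add s f).contains y)
      = (l.filter (fun y => !(y == f))).filter (fun y => !s.contains y) := by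
  rw [List.filter_filter]
  exact List.filter_congr (fun y _ => by rw [pvContainsAdd]; cases s.contains y <;> cases y == f <;> rfl)

theorem pvFilterSeen (s : PySem.Set String) (f : String) (l : List String)
    (h : s.contains f = true) :
    (l.filter (fun y => !(y == f))).filter (fun y => !s.contains y)
      = l.filter (fun y => !s.contains y) := by
  rw [List.filter_filter]
  exact List.filter_congr (fun y _ => by
    by_cases hy : y = f
    · subst hy; simp [(PySem.Set.contains_iff _ _).1 h]
    · simp [hy])

theorem pvAddAll_cons (ps : List String) (bks : List (List String)) (f : String) (l : List String) :
    pvAddAll ps bks (f :: l)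
      = pvAddAll ps (match pvFirstIdx ps (PySem.Str.lower f) with
                     | none => bks
                     | some i => bks.modify i (· ++ [f])) l := rfl

theorem pvKeyB1 (ps : List String) (fs : List String) : ∀ (s : PySem.Set String) (bks : List (List String)),
    (fs.foldl (fun (st : PySem.Set String × List (List String)) f =>
        if PySem.Set.contains st.1 f then st
        else
          let seen' := PySem.Set.add st.1 f
          match pvFirstIdx ps (PySem.Str.lower f) with
          | none => (seen', st.2)
          | some i => (seen', st.2.modify i (· ++ [f]))) (s, bks)).2
      = pvAddAll ps bks ((PySem.List.dedup fs).filter (fun f => !PySem.Set.contains s f)) := by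
  induction fs with
  | nil => intro s bks; rfl
  | cons f fs ih =>
    intro s bks
    rw [List.foldl_cons, pvDedupCons, List.filter_cons]
    by_cases h : PySem.Set.contains s f
    · rw [if_pos h, ih, if_neg (by simp [(PySem.Set.contains_iff _ _).1 h]), pvFilterSeen s f _ h]
    · rw [if_neg h, if_pos (by rw [Bool.eq_false_iff.mpr h]; decide)]
      rw [pvAddAll_cons]
      cases hidx : pvFirstIdx ps (PySem.Str.lower f) with
      | none =>
        simp only [ih, pvFilterAdd]
      | some i =>
        simp only [ih, pvFilterAdd]

theorem pvAddAll_nil_ps (bks : List (List String)) (l : List String) :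
    pvAddAll [] bks l = bks := by
  induction l generalizing bks with
  | nil => rfl
  | cons f l ih => rw [pvAddAll_cons]; exact ih bks

theorem pvAddAll_head (p : String) (ps : List String) (l : List String) :
    ∀ (b0 : List String) (bks : List (List String)),
    pvAddAll (p :: ps) (b0 :: bks) l
      = (b0 ++ l.filter (fun f => pvMatch p f)) :: pvAddAll ps bks (l.filter (fun f => !pvMatch p f)) := by
  induction l with
  | nil => intro b0 bks; simp [pvAddAll]
  | cons f l ih =>
    intro b0 bks
    rw [pvAddAll_cons, List.filter_cons, List.filter_cons]
    cases h : pvMatch p f with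
    | true =>
      have hixp : pvFirstIdx (p :: ps) (PySem.Str.lower f) = some 0 := by
        unfold pvMatch at h; simp only [pvFirstIdx]; rw [if_pos h]
      rw [hixp, if_pos rfl, if_neg (show ¬((!true) = true) by decide)]
      show pvAddAll (p :: ps) ((b0 ++ [f]) :: bks) l = _
      rw [ih]
      simp
    | false =>
      have hm : pvFirstIdx (p :: ps) (PySem.Str.lower f)
          = (pvFirstIdx ps (PySem.Str.lower f)).map (· + 1) := by
        unfold pvMatch at h; simp only [pvFirstIdx]; rw [if_neg (by rw [h]; decide)]
      rw [hm, if_neg (show ¬(false = true) by decide), if_pos (show (!false) = true by decide)]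
      cases hidx : pvFirstIdx ps (PySem.Str.lower f) with
      | none =>
        show pvAddAll (p :: ps) (b0 :: bks) l = _
        rw [ih, pvAddAll_cons, hidx]
      | some i =>
        show pvAddAll (p :: ps) ((b0 :: bks).modify (i + 1) (· ++ [f])) l = _
        rw [show (b0 :: bks).modify (i + 1) (· ++ [f]) = b0 :: bks.modify i (· ++ [f]) from by simp [List.modify]]
        rw [ih, pvAddAll_cons, hidx]

theorem pvKeyB2 (ps : List String) : ∀ (l : List String),
    (pvAddAll ps (ps.map (fun _ => [])) l).flatten = pvGroup ps l := by
  induction ps with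
  | nil => intro l; rw [pvAddAll_nil_ps]; rfl
  | cons p ps ih =>
    intro l
    rw [List.map_cons, pvAddAll_head, List.flatten_cons, List.nil_append, ih, pvGroup]

theorem pvCore (fs ps : List String) :
    ((pvExtendLoop fs ps).foldl (fun (st : PySem.Set String × List String) f =>
        if PySem.Set.contains st.1 f then st else (PySem.Set.add st.1 f, st.2 ++ [f]))
      (PySem.Set.empty, [])).2
      = ((fs.foldl (fun (st : PySem.Set String × List (List String)) f =>
          if PySem.Set.contains st.1 f then st
          else
            let seen' := PySem.Set.add st.1 f
            match pvFirstIdx ps (PySem.Str.lower f) with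
            | none => (seen', st.2)
            | some i => (seen', st.2.modify i (· ++ [f]))) (PySem.Set.empty, ps.map (fun _ => []))).2).flatten := by
  rw [pvDedupLoop, pvKeyB1]
  rw [show pvExtendLoop fs ps = ps.flatMap (fun p => fs.filter (fun f => pvMatch p f)) from by
    unfold pvExtendLoop; rw [PySem.List.foldl_append_eq_flatMap]; rfl]
  rw [pvKeyA]
  rw [show List.filter (fun f => !PySem.Set.contains PySem.Set.empty f) (PySem.List.dedup fs)
        = PySem.List.dedup fs from by simp [PySem.Set.empty, PySem.Set.contains_eq_listContains]]
  rw [pvKeyB2]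

-- ===== VERDICT (by name: the statement is the Claim_ definition above) =====
theorem filter_files_by_modality_py_spec : Claim_equal_filter_files_by_modality_py := by
  intro files modality _
  unfold Spec_filter_files_by_modality_py filter_files_by_modality_py filter_files_by_modality_py_alt
  by_cases h1 : modality = "text"
  · subst h1; exact pvCore files _
  by_cases h2 : modality = "image"
  · subst h2; exact pvCore files _
  by_cases h3 : modality = "stt"
  · subst h3; exact pvCore files _
  by_cases h4 : modality = "tts"
  · subst h4; exact pvCore files _
  by_cases h5 : modality = "video"
  · subst h5; exact pvCore files _
  · have hc : (PySem.Dict.ofList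
      [("text", [".gguf", ".safetensors", ".bin", "config.json", "tokenizer"]),
       ("image", [".safetensors", ".ckpt", ".bin", "config.json", "model_index.json"]),
       ("stt", [".bin", ".pt", "config.json"]),
       ("tts", [".pth", ".pt", ".onnx", "config.json"]),
       ("video", [".safetensors", ".ckpt", "config.json"])]).contains modality = false := by
      by_contra hb
      rw [Bool.not_eq_false] at hb
      have hk := (PySem.Dict.contains_iff_mem_keys _ _).1 hb
      simp only [show (PySem.Dict.ofList
        [("text", [".gguf", ".safetensors", ".bin", "config.json", "tokenizer"]),
         ("image", [".safetensors", ".ckpt", ".bin", "config.json", "model_index.json"]),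
         ("stt", [".bin", ".pt", "config.json"]),
         ("tts", [".pth", ".pt", ".onnx", "config.json"]),
         ("video", [".safetensors", ".ckpt", "config.json"])]).keys
          = ["text", "image", "stt", "tts", "video"] from by decide, List.mem_cons, List.not_mem_nil] at hk
      rcases hk with h | h | h | h | h | h
      · exact h1 h
      · exact h2 h
      · exact h3 h
      · exact h4 h
      · exact h5 h
      · exact h
    have hga := PySem.Dict.getD_of_not_contains _ ([] : List String) hc
    have e1 : (modality == "text") = false := by simp [h1]
    have e2 : (modality == "image") = false := by simp [h2]
    have e3 : (modality == "stt") = false := by simp [h3]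
    have e4 : (modality == "tts") = false := by simp [h4]
    have e5 : (modality == "video") = false := by simp [h5]
    simp only [e1, e2, e3, e4, e5, Bool.false_eq_true, if_false, hga]
    exact pvCore files []
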